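-- pv_equiv track=rewrite | github.com/aitor-alcazar/avp-path | src/grid.py | _update_bounds
-- ===== SOURCE A (Python) =====
-- def _update_bounds(coords, min_x, min_y, max_x, max_y):
--     """Update bounds based on coordinates"""
--     for x, y in coords:
--         if x < min_x:
--             min_x = x
--         if y < min_y:
--             min_y = y
--         if x > max_x:
--             max_x = x
--         if y > max_y:
--             max_y = y
--     return min_x, min_y, max_x, max_y
-- ===== SOURCE B (Python) =====
-- def _update_bounds(coords, min_x, min_y, max_x, max_y):
--     """Update bounds based on coordinates"""
--     xs = [x for x, _ in coords]
--     ys = [y for _, y in coords]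
--     return (min([min_x] + xs), min([min_y] + ys),
--             max([max_x] + xs), max([max_y] + ys))
-- ===== Notes on version B (the rewrite author's own statement) =====
-- stated objective: idiomatic
-- what changed: Replaced the single four-accumulator loop with branches by four independent per-dimension min/max reductions, each seeded with the incoming bound.
import Mathlib
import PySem

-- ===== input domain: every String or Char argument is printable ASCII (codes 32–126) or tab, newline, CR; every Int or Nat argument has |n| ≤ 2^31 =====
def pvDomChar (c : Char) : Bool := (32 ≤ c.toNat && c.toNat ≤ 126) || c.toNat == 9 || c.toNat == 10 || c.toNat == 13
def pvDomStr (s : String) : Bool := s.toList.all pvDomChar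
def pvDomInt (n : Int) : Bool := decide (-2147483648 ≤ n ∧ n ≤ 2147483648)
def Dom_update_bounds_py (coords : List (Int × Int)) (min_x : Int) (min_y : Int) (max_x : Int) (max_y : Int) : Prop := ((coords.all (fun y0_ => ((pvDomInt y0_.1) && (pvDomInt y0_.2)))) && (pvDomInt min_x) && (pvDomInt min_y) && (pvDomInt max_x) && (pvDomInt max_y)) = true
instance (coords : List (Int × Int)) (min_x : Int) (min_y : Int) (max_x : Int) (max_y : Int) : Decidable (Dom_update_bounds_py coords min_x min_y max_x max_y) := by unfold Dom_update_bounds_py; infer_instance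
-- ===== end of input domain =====

-- B replaces A's single four-accumulator loop by four independent per-dimension min/max reductions (idiomatic; no speed claim).


-- ===== PORT A =====
def update_bounds_py (coords : List (Int × Int)) (min_x : Int) (min_y : Int) (max_x : Int) (max_y : Int) : Int × Int × Int × Int :=
  match coords with
  | [] => (min_x, min_y, max_x, max_y)
  | (x, y) :: rest =>
      update_bounds_py rest
        (if x < min_x then x else min_x)
        (if y < min_y then y else min_y)
        (if x > max_x then x else max_x)
        (if y > max_y then y else max_y)

-- ===== PORT B =====
-- B: four independent per-dimension reductions, each seeded with the incoming bound
def update_bounds_py_alt (coords : List (Int × Int)) (min_x : Int) (min_y : Int) (max_x : Int) (max_y : Int) : Int × Int × Int × Int :=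
  let xs := coords.map Prod.fst
  let ys := coords.map Prod.snd
  (xs.foldl min min_x, ys.foldl min min_y, xs.foldl max max_x, ys.foldl max max_y)

-- ===== PRECONDITION & SPEC =====
def Spec_update_bounds_py (coords : List (Int × Int)) (min_x : Int) (min_y : Int) (max_x : Int) (max_y : Int) (out : Int × Int × Int × Int) : Prop := out = update_bounds_py_alt coords min_x min_y max_x max_y
instance (coords : List (Int × Int)) (min_x : Int) (min_y : Int) (max_x : Int) (max_y : Int) (out : Int × Int × Int × Int) : Decidable (Spec_update_bounds_py coords min_x min_y max_x max_y out) := by unfold Spec_update_bounds_py; infer_instance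

-- ===== CLAIM (what is proved, stated in full; the proofs are below) =====
def Claim_equal_update_bounds_py : Prop := ∀ (coords : List (Int × Int)) (min_x : Int) (min_y : Int) (max_x : Int) (max_y : Int), Dom_update_bounds_py coords min_x min_y max_x max_y → Spec_update_bounds_py coords min_x min_y max_x max_y (update_bounds_py coords min_x min_y max_x max_y)

-- ===== LEMMAS AND PROOFS =====

-- ===== VERDICT (by name: the statement is the Claim_ definition above) =====
theorem ub_eq (coords : List (Int × Int)) : ∀ (a b c d : Int),
    update_bounds_py coords a b c d = update_bounds_py_alt coords a b c d := by
  induction coords with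
  | nil => intro a b c d; simp [update_bounds_py, update_bounds_py_alt]
  | cons p rest ih =>
      intro a b c d
      obtain ⟨x, y⟩ := p
      have h1 : (if x < a then x else a) = min a x := by omega
      have h2 : (if y < b then y else b) = min b y := by omega
      have h3 : (if x > c then x else c) = max c x := by omega
      have h4 : (if y > d then y else d) = max d y := by omega
      simp only [update_bounds_py, update_bounds_py_alt, List.map_cons, List.foldl_cons,
        h1, h2, h3, h4]
      exact ih (min a x) (min b y) (max c x) (max d y)

theorem update_bounds_py_spec : Claim_equal_update_bounds_py := by
  intro coords a b c d _
  unfold Spec_update_bounds_py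
  exact ub_eq coords a b c d
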